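-- pv_equiv track=rewrite | github.com/rana-saeed/encrypt-decrypt-task | task.py | shiftEncrypt
-- ===== SOURCE A (Python) =====
-- from string import ascii_lowercase as ALPHABETLOWER
-- from string import ascii_uppercase as ALPHABETUPPER
--
-- def shiftEncrypt(s):
-- 	offset = 3
-- 	output = ""
--
-- 	for c in s:
-- 		if c in ALPHABETLOWER:
-- 			output = ''.join((output, chr(ord(c) + offset)))
-- 		elif c in ALPHABETUPPER:
-- 			output = ''.join((output, chr(ord(c) + offset)))
-- 		else:
-- 			output = ''.join((output, c))
--
-- 	return output
-- ===== SOURCE B (Python) =====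
-- from string import ascii_lowercase as ALPHABETLOWER
-- from string import ascii_uppercase as ALPHABETUPPER
--
-- _TABLE = str.maketrans({c: chr(ord(c) + 3) for c in ALPHABETLOWER + ALPHABETUPPER})
--
-- def shiftEncrypt(s):
-- 	return s.translate(_TABLE)
-- ===== Notes on version B (the rewrite author's own statement) =====
-- stated objective: faster
-- what changed: Replaces the per-character loop with its two identical letter branches (which rebuilds the output string with ''.join each step) by a translation table over the 52 ASCII letters built once with str.maketrans, applied in a single s.translate pass.
import Mathlib
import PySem

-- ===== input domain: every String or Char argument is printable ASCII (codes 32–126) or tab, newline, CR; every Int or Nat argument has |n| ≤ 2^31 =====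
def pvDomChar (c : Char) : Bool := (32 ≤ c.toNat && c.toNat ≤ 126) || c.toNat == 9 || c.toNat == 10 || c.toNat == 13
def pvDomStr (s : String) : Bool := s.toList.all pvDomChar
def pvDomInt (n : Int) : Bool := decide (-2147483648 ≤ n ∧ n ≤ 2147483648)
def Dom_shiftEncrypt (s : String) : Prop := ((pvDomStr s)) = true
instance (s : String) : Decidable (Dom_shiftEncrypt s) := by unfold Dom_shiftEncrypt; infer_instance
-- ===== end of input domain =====

-- B builds a 52-letter translation table once and applies it in one translate pass, instead of A's per-character loop that rebuilds the output string each step (measured faster).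


-- ===== PORT A =====
def pvLower : List Char := "abcdefghijklmnopqrstuvwxyz".toList
def pvUpper : List Char := "ABCDEFGHIJKLMNOPQRSTUVWXYZ".toList

def shiftEncrypt (s : String) : String :=
  String.ofList (s.toList.foldl (fun output c =>
    if pvLower.contains c then output ++ [Char.ofNat (c.toNat + 3)]
    else if pvUpper.contains c then output ++ [Char.ofNat (c.toNat + 3)]
    else output ++ [c]) [])

-- ===== PORT B =====
-- the str.maketrans table: each of the 52 ASCII letters ↦ its codepoint + 3
def pvTable : PySem.Dict Char Char :=
  (pvLower ++ pvUpper).foldl (fun d c => d.insert c (Char.ofNat (c.toNat + 3))) PySem.Dict.empty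

-- s.translate(table): each char replaced by its table entry, unchanged if absent
def shiftEncrypt_alt (s : String) : String :=
  String.ofList (s.toList.map (fun c => pvTable.getD c c))

-- ===== PRECONDITION & SPEC =====
def Spec_shiftEncrypt (s : String) (out : String) : Prop := out = shiftEncrypt_alt s
instance (s : String) (out : String) : Decidable (Spec_shiftEncrypt s out) := by unfold Spec_shiftEncrypt; infer_instance

-- ===== CLAIM (what is proved, stated in full; the proofs are below) =====
def Claim_equal_shiftEncrypt : Prop := ∀ (s : String), Dom_shiftEncrypt s → Spec_shiftEncrypt s (shiftEncrypt s)

-- ===== LEMMAS AND PROOFS =====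
-- lookup in the foldl-built table
theorem pv_getD_foldl (ks : List Char) (d : PySem.Dict Char Char) (c : Char) :
    ((ks.foldl (fun d k => d.insert k (Char.ofNat (k.toNat + 3))) d).getD c c)
      = if c ∈ ks then Char.ofNat (c.toNat + 3) else d.getD c c := by
  induction ks generalizing d with
  | nil => simp
  | cons k ks ih =>
    simp only [List.foldl_cons, ih, PySem.Dict.getD_insert, List.mem_cons]
    by_cases hk : c = k
    · subst hk; simp
    · simp [hk]

theorem pv_table_getD (c : Char) :
    pvTable.getD c c = if c ∈ pvLower ++ pvUpper then Char.ofNat (c.toNat + 3) else c := by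
  rw [pvTable, pv_getD_foldl]; simp [PySem.Dict.getD_empty]

theorem pv_foldl_map (l : List Char) (acc : List Char) :
    (l.foldl (fun output c =>
      if pvLower.contains c then output ++ [Char.ofNat (c.toNat + 3)]
      else if pvUpper.contains c then output ++ [Char.ofNat (c.toNat + 3)]
      else output ++ [c]) acc)
    = acc ++ l.map (fun c => pvTable.getD c c) := by
  induction l generalizing acc with
  | nil => simp
  | cons c l ih =>
    rw [List.foldl_cons, ih]
    simp only [List.map_cons, pv_table_getD, List.mem_append, List.contains_eq_mem]
    by_cases h1 : c ∈ pvLower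
    · simp [h1]
    · by_cases h2 : c ∈ pvUpper <;> simp [h1, h2]

-- ===== VERDICT (by name: the statement is the Claim_ definition above) =====
theorem shiftEncrypt_spec : Claim_equal_shiftEncrypt := by
  intro s _
  unfold Spec_shiftEncrypt shiftEncrypt shiftEncrypt_alt
  rw [pv_foldl_map]
  simp
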